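-- pv_equiv track=rewrite | github.com/polkerty/pgfarmlogs | main.py | chunk_log
-- ===== SOURCE A (Python) =====
-- MAGIC = "==~_~===-=-===~_~=="
--
-- def chunk_log(log_text: str, magic: str = MAGIC):
--     """
--     Split the log into (filename, text_chunk) pairs.
--     The first chunk is labeled "head" (i.e., before the first MAGIC).
--     Then each subsequent chunk is preceded by <MAGIC>filename<MAGIC>.
--     """
--     chunks = []
--     current_filename = "head"
--     pos = 0
--
--     while True:
--         # Find the next occurrence of the magic delimiter
--         next_magic = log_text.find(magic, pos)
--         if next_magic == -1:
--             # No more magic: everything from 'pos' to the end is the last chunk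
--             text_chunk = log_text[pos:]
--             chunks.append((current_filename, text_chunk))
--             break
--         # The text before 'next_magic' is the chunk for the current filename
--         text_chunk = log_text[pos:next_magic]
--         chunks.append((current_filename, text_chunk))
--
--         # Move past the magic delimiter
--         pos = next_magic + len(magic)
--
--         # Now read until the next magic to grab the "filename"
--         next_magic2 = log_text.find(magic, pos)
--         if next_magic2 == -1:
--             # If we never find the second magic, treat the rest as the filename
--             current_filename = log_text[pos:]
--             # There's no text chunk after that, so we end
--             break
--         current_filename = log_text[pos:next_magic2]
--
--         # Move 'pos' past this second magic
--         pos = next_magic2 + len(magic)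
--
--     return chunks
-- ===== SOURCE B (Python) =====
-- MAGIC = "==~_~===-=-===~_~=="
--
-- def _pairs(tokens):
--     # consume tokens two at a time: (filename, chunk); a trailing lone
--     # filename token yields nothing
--     if len(tokens) < 2:
--         return []
--     return [(tokens[0], tokens[1])] + _pairs(tokens[2:])
--
-- def chunk_log(log_text: str, magic: str = MAGIC):
--     parts = log_text.split(magic)
--     return [("head", parts[0])] + _pairs(parts[1:])
-- ===== Notes on version B (the rewrite author's own statement) =====
-- stated objective: simpler
-- what changed: Replaced A's manual find/advance index scan with its two interleaved find calls and loop-carried filename state by a tokenize-then-pair decomposition: split the log once on the delimiter, label the first token 'head', and pair consecutive remaining tokens (a trailing lone filename token yields nothing).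
import Mathlib
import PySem

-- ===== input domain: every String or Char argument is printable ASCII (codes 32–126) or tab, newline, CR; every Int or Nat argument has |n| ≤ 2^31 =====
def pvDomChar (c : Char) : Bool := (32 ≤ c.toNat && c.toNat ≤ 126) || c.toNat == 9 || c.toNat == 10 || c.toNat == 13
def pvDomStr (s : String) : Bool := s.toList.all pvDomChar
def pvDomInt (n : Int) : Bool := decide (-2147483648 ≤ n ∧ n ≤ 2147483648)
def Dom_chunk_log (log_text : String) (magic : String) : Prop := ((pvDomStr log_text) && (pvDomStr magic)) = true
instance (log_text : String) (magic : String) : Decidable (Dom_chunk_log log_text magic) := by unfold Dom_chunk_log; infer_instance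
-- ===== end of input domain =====

-- B replaces A's manual find/advance index scan with a split-then-pair decomposition
-- (tokenize once with str.split, then pair consecutive tokens); objective: simpler.

-- ===== PORT A =====
-- the while-loop of A; fuel only makes the recursion total (A's loop terminates
-- whenever magic ≠ "", which Pre_ guarantees; fuel is never exhausted there)
def chunkLoop (s sep : List Char) : Nat → Int → List Char → List (List Char × List Char) → List (List Char × List Char)
  | 0, _, _, chunks => chunks
  | fuel+1, pos, current_filename, chunks =>
    let next_magic := PySem.Chars.findFrom s sep pos
    if next_magic = -1 then
      chunks ++ [(current_filename, PySem.List.slice s (some pos) none)]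
    else
      let chunks2 := chunks ++ [(current_filename, PySem.List.slice s (some pos) (some next_magic))]
      let pos2 := next_magic + (sep.length : Int)
      let next_magic2 := PySem.Chars.findFrom s sep pos2
      if next_magic2 = -1 then chunks2
      else chunkLoop s sep fuel (next_magic2 + (sep.length : Int))
             (PySem.List.slice s (some pos2) (some next_magic2)) chunks2

def chunk_log (log_text : String) (magic : String) : List (String × String) :=
  (chunkLoop log_text.toList magic.toList (log_text.toList.length + 1) 0 "head".toList []).map
    (fun p => (String.ofList p.1, String.ofList p.2))

-- ===== PORT B =====
-- _pairs of Source B: consume tokens two at a time; a trailing lone token yields nothing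
def altPairs : List (List Char) → List (List Char × List Char)
  | t0 :: t1 :: rest => (t0, t1) :: altPairs rest
  | _ => []

def chunk_log_alt (log_text : String) (magic : String) : List (String × String) :=
  match PySem.Chars.split? log_text.toList magic.toList with
  | none => []      -- magic = "": Source B's split raises ValueError (outside Pre_)
  | some parts =>
    match parts with
    | p0 :: rest =>  -- [("head", parts[0])] + _pairs(parts[1:])
        ("head", String.ofList p0) :: (altPairs rest).map (fun p => (String.ofList p.1, String.ofList p.2))
    | [] => []       -- unreachable: str.split never returns an empty list

-- ===== PRECONDITION & SPEC =====
-- Pre_ excludes only magic = "": there A's find('',pos)-loop never advances and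
-- diverges (no value is returned), while B's str.split raises ValueError.
def Pre_chunk_log (log_text : String) (magic : String) : Prop := magic ≠ ""
instance (log_text : String) (magic : String) : Decidable (Pre_chunk_log log_text magic) := by unfold Pre_chunk_log; infer_instance
def pvWitness_chunk_log : String × String := ("aXbXc", "X")

def Spec_chunk_log (log_text : String) (magic : String) (out : List (String × String)) : Prop := out = chunk_log_alt log_text magic
instance (log_text : String) (magic : String) (out : List (String × String)) : Decidable (Spec_chunk_log log_text magic out) := by unfold Spec_chunk_log; infer_instance

-- ===== CLAIM (what is proved, stated in full; the proofs are below) =====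
def Claim_equal_chunk_log : Prop := ∀ (log_text : String) (magic : String), Dom_chunk_log log_text magic → Pre_chunk_log log_text magic → Spec_chunk_log log_text magic (chunk_log log_text magic)

-- ===== LEMMAS AND PROOFS =====

-- reference splitting: the list of sep-separated parts, via first occurrences
def splitList (sep : List Char) (hsep : sep ≠ []) (l : List Char) : List (List Char) :=
  if PySem.Chars.find l sep = -1 then [l]
  else l.take (PySem.Chars.find l sep).toNat ::
    splitList sep hsep (l.drop ((PySem.Chars.find l sep).toNat + sep.length))
termination_by l.length
decreasing_by
  rename_i h
  have h0 : 0 ≤ PySem.Chars.find l sep := by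
    have := PySem.Chars.neg_one_le_find l sep; omega
  obtain ⟨hpre, -⟩ := PySem.Chars.find_spec h0
  have hlen := hpre.length_le
  simp only [List.length_drop] at hlen ⊢
  have hs : 1 ≤ sep.length := List.length_pos_iff.mpr hsep
  omega

lemma splitList_neg {sep l : List Char} (hsep : sep ≠ [])
    (h : PySem.Chars.find l sep = -1) : splitList sep hsep l = [l] := by
  unfold splitList; simp [h]

lemma splitList_pos {sep l : List Char} (hsep : sep ≠ [])
    (h : PySem.Chars.find l sep ≠ -1) :
    splitList sep hsep l =
      l.take (PySem.Chars.find l sep).toNat ::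
        splitList sep hsep (l.drop ((PySem.Chars.find l sep).toNat + sep.length)) := by
  conv_lhs => rw [splitList]
  simp [h]

lemma splitList_ne_nil {sep l : List Char} (hsep : sep ≠ []) :
    splitList sep hsep l ≠ [] := by
  by_cases h : PySem.Chars.find l sep = -1
  · simp [splitList_neg hsep h]
  · simp [splitList_pos hsep h]

-- find = 0 when sep is a prefix
lemma find_prefix_zero {sep l : List Char} (hp : sep <+: l) :
    PySem.Chars.find l sep = 0 := by
  have h0 : 0 ≤ PySem.Chars.find l sep :=
    (PySem.Chars.find_nonneg_iff l sep).mpr hp.isInfix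
  obtain ⟨-, hmin⟩ := PySem.Chars.find_spec h0
  by_contra hne
  exact hmin 0 (by omega) (by simpa using hp)

-- find on a cons that does not start with sep
lemma find_cons_not_prefix {sep : List Char} (c : Char) (rest : List Char)
    (hnp : ¬ sep <+: (c :: rest)) :
    PySem.Chars.find (c :: rest) sep =
      if PySem.Chars.find rest sep = -1 then -1 else 1 + PySem.Chars.find rest sep := by
  split
  · rename_i hr
    rw [PySem.Chars.find_eq_neg_one_iff] at hr ⊢
    intro hinf
    obtain ⟨j, hj⟩ := (PySem.Chars.exists_prefix_drop_iff_isIn sep (c :: rest)).mpr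
      ((PySem.Chars.isIn_iff_infix sep (c :: rest)).mpr hinf)
    match j, hj with
    | 0, hj => exact hnp (by simpa using hj)
    | (k+1), hj =>
      rw [List.drop_succ_cons] at hj
      exact hr (hj.isInfix.trans (List.drop_suffix k rest).isInfix)
  · rename_i hr
    have h0r : 0 ≤ PySem.Chars.find rest sep := by
      have := PySem.Chars.neg_one_le_find rest sep; omega
    obtain ⟨hpr, hminr⟩ := PySem.Chars.find_spec h0r
    set fr := (PySem.Chars.find rest sep).toNat with hfr
    have hinf : sep <:+: (c :: rest) :=
      hpr.isInfix.trans ((List.drop_suffix fr rest).trans (List.suffix_cons c rest)).isInfix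
    have h0 : 0 ≤ PySem.Chars.find (c :: rest) sep :=
      (PySem.Chars.find_nonneg_iff _ _).mpr hinf
    obtain ⟨hp, hmin⟩ := PySem.Chars.find_spec h0
    have heq : (PySem.Chars.find (c :: rest) sep).toNat = fr + 1 := by
      rcases Nat.lt_trichotomy (PySem.Chars.find (c :: rest) sep).toNat (fr+1) with h|h|h
      · -- less
        match hn : (PySem.Chars.find (c :: rest) sep).toNat, hp with
        | 0, hp => exact absurd (by simpa using hp) hnp
        | (k+1), hp =>
          rw [hn] at h
          exact absurd (by simpa [List.drop_succ_cons] using hp) (hminr k (by omega))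
      · exact h
      · have := hmin (fr+1) h
        rw [List.drop_succ_cons] at this
        exact absurd hpr this
    omega

-- the character scan splitOn.go computes splitList
lemma go_eq (sep : List Char) (hsep : sep ≠ []) :
    ∀ (fuel : Nat) (l cur : List Char) (acc : List (List Char)), l.length < fuel →
    PySem.Chars.splitOn.go sep fuel l cur acc =
      acc.reverse ++
        (match splitList sep hsep l with
         | [] => []
         | p :: ps => (cur.reverse ++ p) :: ps) := by
  intro fuel
  induction fuel with
  | zero => intro l cur acc h; omega
  | succ n ih =>
    intro l cur acc h
    match l with
    | [] =>
      rw [PySem.Chars.splitOn.go.eq_def]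
      have hfind : PySem.Chars.find [] sep = -1 := by
        rw [PySem.Chars.find_eq_neg_one_iff]
        intro hh
        exact hsep (List.eq_nil_of_infix_nil hh)
      simp [splitList_neg hsep hfind]
    | c :: rest =>
      rw [PySem.Chars.splitOn.go.eq_def]
      by_cases hp : sep.isPrefixOf (c :: rest)
      · simp only [hp, if_true]
        have hp' : sep <+: (c :: rest) := List.isPrefixOf_iff_prefix.mp hp
        have hs1 : 1 ≤ sep.length := List.length_pos_iff.mpr hsep
        have hlen : (List.drop sep.length (c :: rest)).length < n := by
          simp only [List.length_drop, List.length_cons] at h ⊢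
          have := hp'.length_le
          simp at this
          omega
        rw [ih _ _ _ hlen]
        have hf0 : PySem.Chars.find (c :: rest) sep = 0 := find_prefix_zero hp'
        rw [splitList_pos (l := c :: rest) hsep (by rw [hf0]; decide)]
        rw [hf0]
        simp only [Int.toNat_zero, List.take_zero, Nat.zero_add, List.reverse_cons,
          List.append_assoc, List.singleton_append, List.reverse_nil, List.nil_append,
          List.append_nil]
        cases hsp : splitList sep hsep (List.drop sep.length (c :: rest)) with
        | nil => exact absurd hsp (splitList_ne_nil hsep)
        | cons p ps => rfl
      · simp only [hp, if_false, Bool.false_eq_true]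
        have hnp : ¬ sep <+: (c :: rest) := fun hh => hp (List.isPrefixOf_iff_prefix.mpr hh)
        have hlen : rest.length < n := by simp at h; omega
        rw [ih _ _ _ hlen]
        have hfc := find_cons_not_prefix c rest hnp
        by_cases hr : PySem.Chars.find rest sep = -1
        · rw [splitList_neg (l := c :: rest) hsep (by rw [hfc, if_pos hr])]
          rw [splitList_neg (l := rest) hsep hr]
          simp
        · have h0r : 0 ≤ PySem.Chars.find rest sep := by
            have := PySem.Chars.neg_one_le_find rest sep; omega
          have hfl : PySem.Chars.find (c :: rest) sep = 1 + PySem.Chars.find rest sep := by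
            rw [hfc, if_neg hr]
          rw [splitList_pos (l := c :: rest) hsep (by rw [hfl]; omega)]
          rw [splitList_pos (l := rest) hsep hr]
          rw [hfl]
          have htn : (1 + PySem.Chars.find rest sep).toNat = (PySem.Chars.find rest sep).toNat + 1 := by omega
          rw [htn]
          simp only [List.take_succ_cons]
          have hdrop : List.drop ((PySem.Chars.find rest sep).toNat + 1 + sep.length) (c :: rest)
              = List.drop ((PySem.Chars.find rest sep).toNat + sep.length) rest := by
            have : (PySem.Chars.find rest sep).toNat + 1 + sep.length
                = ((PySem.Chars.find rest sep).toNat + sep.length) + 1 := by omega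
            rw [this, List.drop_succ_cons]
          rw [hdrop]
          simp

lemma splitOn_eq (s sep : List Char) (hsep : sep ≠ []) :
    PySem.Chars.splitOn s sep = splitList sep hsep s := by
  unfold PySem.Chars.splitOn
  rw [go_eq sep hsep (s.length + 1) s [] [] (by omega)]
  match hsp : splitList sep hsep s with
  | [] => exact absurd hsp (splitList_ne_nil hsep)
  | p :: ps => simp

-- A's loop computes head-then-pairs of the parts of the remaining suffix
lemma chunkLoop_eq (s sep : List Char) (hsep : sep ≠ []) :
    ∀ (fuel pos : Nat) (fname : List Char) (acc : List (List Char × List Char)),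
      pos ≤ s.length → s.length - pos < fuel →
    chunkLoop s sep fuel (pos : Int) fname acc =
      acc ++ (fname, (splitList sep hsep (s.drop pos)).headI) ::
        altPairs (splitList sep hsep (s.drop pos)).tail := by
  have hs1 : 1 ≤ sep.length := List.length_pos_iff.mpr hsep
  intro fuel
  induction fuel with
  | zero => intro pos fname acc hpos hfuel; omega
  | succ n ih =>
    intro pos fname acc hpos hfuel
    simp only [chunkLoop]
    rw [PySem.Chars.findFrom_natCast s sep pos hpos]
    by_cases hf : PySem.Chars.find (List.drop pos s) sep = -1
    · rw [if_pos hf, if_pos rfl]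
      rw [splitList_neg hsep hf]
      simp [PySem.List.slice_from_natCast, altPairs]
    · rw [if_neg hf]
      have h0f : 0 ≤ PySem.Chars.find (List.drop pos s) sep := by
        have := PySem.Chars.neg_one_le_find (List.drop pos s) sep; omega
      obtain ⟨hpre1, -⟩ := PySem.Chars.find_spec h0f
      set fn := (PySem.Chars.find (List.drop pos s) sep).toNat with hfn
      have hfval : PySem.Chars.find (List.drop pos s) sep = (fn : Int) := by omega
      have hlen1 := hpre1.length_le
      simp only [List.length_drop] at hlen1
      have hq : pos + fn + sep.length ≤ s.length := by omega
      rw [if_neg (by rw [hfval]; omega)]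
      rw [hfval, PySem.List.slice_natCast_add s pos fn]
      have hcast : (pos : Int) + (fn : Int) + (sep.length : Int)
          = ((pos + fn + sep.length : Nat) : Int) := by push_cast; ring
      rw [hcast]
      rw [PySem.Chars.findFrom_natCast s sep (pos + fn + sep.length) hq]
      have hdrop1 : List.drop (pos + fn + sep.length) s
          = List.drop (fn + sep.length) (List.drop pos s) := by
        rw [List.drop_drop]; congr 1; omega
      rw [splitList_pos (l := List.drop pos s) hsep (by omega)]
      rw [← hfn, ← hdrop1]
      by_cases hf2 : PySem.Chars.find (List.drop (pos + fn + sep.length) s) sep = -1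
      · rw [if_pos hf2, if_pos rfl]
        rw [splitList_neg hsep hf2]
        simp [altPairs]
      · rw [if_neg hf2]
        have h0f2 : 0 ≤ PySem.Chars.find (List.drop (pos + fn + sep.length) s) sep := by
          have := PySem.Chars.neg_one_le_find (List.drop (pos + fn + sep.length) s) sep; omega
        obtain ⟨hpre2, -⟩ := PySem.Chars.find_spec h0f2
        set f2n := (PySem.Chars.find (List.drop (pos + fn + sep.length) s) sep).toNat with hf2n
        have hf2val : PySem.Chars.find (List.drop (pos + fn + sep.length) s) sep = (f2n : Int) := by omega
        have hlen2 := hpre2.length_le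
        simp only [List.length_drop] at hlen2
        have hq2 : pos + fn + sep.length + f2n + sep.length ≤ s.length := by omega
        rw [if_neg (by rw [hf2val]; omega)]
        rw [hf2val, PySem.List.slice_natCast_add s (pos + fn + sep.length) f2n]
        have hcast2 : ((pos + fn + sep.length : Nat) : Int) + (f2n : Int) + (sep.length : Int)
            = ((pos + fn + sep.length + f2n + sep.length : Nat) : Int) := by push_cast; ring
        rw [hcast2]
        rw [ih (pos + fn + sep.length + f2n + sep.length) _ _ hq2 (by omega)]
        rw [splitList_pos (l := List.drop (pos + fn + sep.length) s) hsep (by omega)]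
        rw [← hf2n]
        have hdrop2 : List.drop (pos + fn + sep.length + f2n + sep.length) s
            = List.drop (f2n + sep.length) (List.drop (pos + fn + sep.length) s) := by
          rw [List.drop_drop]; congr 1; omega
        rw [← hdrop2]
        cases hsp : splitList sep hsep (List.drop (pos + fn + sep.length + f2n + sep.length) s) with
        | nil => exact absurd hsp (splitList_ne_nil hsep)
        | cons r0 rs => simp [altPairs]

-- ===== VERDICT (by name: the statement is the Claim_ definition above) =====
theorem chunk_log_spec : Claim_equal_chunk_log := by
  intro log_text magic _dom hpre
  have hsep : magic.toList ≠ [] := by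
    intro h
    exact hpre (by
      have := congrArg String.ofList h
      simpa using this)
  unfold Spec_chunk_log chunk_log chunk_log_alt
  simp only [PySem.Chars.split?]
  rw [splitOn_eq log_text.toList magic.toList hsep]
  have hloop := chunkLoop_eq log_text.toList magic.toList hsep
    (log_text.toList.length + 1) 0 "head".toList [] (Nat.zero_le _) (by omega)
  simp only [Nat.cast_zero, List.drop_zero, List.nil_append] at hloop
  rw [hloop]
  cases hsp : splitList magic.toList hsep log_text.toList with
  | nil => exact absurd hsp (splitList_ne_nil hsep)
  | cons p0 ps =>
    rw [if_neg (by simp [hsep])]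
    simp
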